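-- pv_equiv track=rewrite | github.com/SaiKrishnaVoruganti86/automating_art_instructions | report_generator.py | calculate_pdf_generation_status
-- ===== SOURCE A (Python) =====
-- def calculate_pdf_generation_status(items):
--     """
--     Calculate PDF generation status for a sales order
--     Returns a formatted string showing generated PDFs vs total unique logo SKUs
--     """
--     # Get unique logo SKUs for this sales order (excluding invalid ones)
--     unique_logos = set()
--     pdf_generated_logos = set()
--
--     for item in items:
--         logo_sku = str(item.get('LOGO', '')).strip()
--
--         # Skip invalid logo SKUs
--         if logo_sku and logo_sku not in ['', '0', '0000', 'nan', 'NaN']: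
--             unique_logos.add(logo_sku)
--
--             # Check if PDF was successfully generated for this logo
--             execution_status = item.get('Execution Status', '')
--             if execution_status == 'SUCCESS':
--                 pdf_generated_logos.add(logo_sku)
--
--     total_unique_logos = len(unique_logos)
--     generated_pdfs = len(pdf_generated_logos)
--
--     if total_unique_logos == 0:
--         return "0 out of 0 (No valid logos)"
--
--     return f"{generated_pdfs} out of {total_unique_logos}"
-- ===== SOURCE B (Python) =====
-- def calculate_pdf_generation_status(items):
--     """
--     Calculate PDF generation status for a sales order
--     Returns a formatted string showing generated PDFs vs total unique logo SKUs
--     """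
--     def logo_of(item):
--         return str(item.get('LOGO', '')).strip()
--
--     invalid = ('', '0', '0000', 'nan', 'NaN')
--
--     # Stage 1: ordered list of the distinct valid logo SKUs
--     logos = []
--     for item in items:
--         sku = logo_of(item)
--         if sku not in invalid and sku not in logos:
--             logos.append(sku)
--
--     if not logos:
--         return "0 out of 0 (No valid logos)"
--
--     # Stage 2: for each distinct logo, rescan the items for a successful generation
--     generated = sum(
--         1 for sku in logos
--         if any(logo_of(item) == sku and item.get('Execution Status', '') == 'SUCCESS'
--                for item in items)
--     )
--     return f"{generated} out of {len(logos)}"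
-- ===== Notes on version B (the rewrite author's own statement) =====
-- stated objective: alternative
-- what changed: Replaces A's single pass over two accumulated sets by a staged computation: first collect the ordered distinct valid logos, then count the generated ones by rescanning all items per logo with any(...), so no PDF set is ever maintained.
import Mathlib
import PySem

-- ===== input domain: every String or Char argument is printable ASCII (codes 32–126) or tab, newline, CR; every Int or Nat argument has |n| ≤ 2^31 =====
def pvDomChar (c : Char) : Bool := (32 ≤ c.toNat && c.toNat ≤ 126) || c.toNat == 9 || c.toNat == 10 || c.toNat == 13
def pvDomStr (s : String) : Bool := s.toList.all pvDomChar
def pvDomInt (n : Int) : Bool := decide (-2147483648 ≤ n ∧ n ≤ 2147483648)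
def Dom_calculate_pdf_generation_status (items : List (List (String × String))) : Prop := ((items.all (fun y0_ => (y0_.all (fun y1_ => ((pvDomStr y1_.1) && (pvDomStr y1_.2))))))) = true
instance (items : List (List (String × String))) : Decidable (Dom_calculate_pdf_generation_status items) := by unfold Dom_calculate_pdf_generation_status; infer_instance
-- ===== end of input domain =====

-- B stages the work: first the ordered distinct valid logos, then a per-logo rescan of the
-- items with any(...) — an alternative decomposition that never maintains A's second set.

-- ===== PORT A =====
-- loop body of A: add to the set of valid logos, and to the PDF set when status is SUCCESS
def pvStepA (st : PySem.Set String × PySem.Set String) (item : List (String × String)) :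
    PySem.Set String × PySem.Set String :=
  let logo_sku := PySem.Str.strip ((PySem.Dict.mk item).getD "LOGO" "")
  if logo_sku ≠ "" ∧ logo_sku ∉ (["", "0", "0000", "nan", "NaN"] : List String) then
    let unique_logos := PySem.Set.add st.1 logo_sku
    let execution_status := (PySem.Dict.mk item).getD "Execution Status" ""
    if execution_status == "SUCCESS" then
      (unique_logos, PySem.Set.add st.2 logo_sku)
    else
      (unique_logos, st.2)
  else st

def calculate_pdf_generation_status (items : List (List (String × String))) : String :=
  let p := items.foldl pvStepA (PySem.Set.empty, PySem.Set.empty)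
  let total_unique_logos : Int := PySem.Set.len p.1
  let generated_pdfs : Int := PySem.Set.len p.2
  if total_unique_logos = 0 then "0 out of 0 (No valid logos)"
  else PySem.Int.toStr generated_pdfs ++ " out of " ++ PySem.Int.toStr total_unique_logos

-- ===== PORT B =====
def pvLogoOf (item : List (String × String)) : String :=
  PySem.Str.strip ((PySem.Dict.mk item).getD "LOGO" "")

def pvInvalid : List String := ["", "0", "0000", "nan", "NaN"]

-- stage 1 of B: the ordered list of distinct valid logo SKUs (hand-written list building in Source B)
def pvBuildLogos (items : List (List (String × String))) : List String :=
  items.foldl (fun acc item =>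
    let sku := pvLogoOf item
    if sku ∉ pvInvalid ∧ sku ∉ acc then acc ++ [sku] else acc) []

-- stage 2 of B: any(logo_of(item) == sku and item.get('Execution Status','') == 'SUCCESS' for item in items)
def pvHasSuccess (items : List (List (String × String))) (sku : String) : Bool :=
  items.any (fun item =>
    (pvLogoOf item == sku) && ((PySem.Dict.mk item).getD "Execution Status" "" == "SUCCESS"))

def calculate_pdf_generation_status_alt (items : List (List (String × String))) : String :=
  let logos := pvBuildLogos items
  if logos.isEmpty then "0 out of 0 (No valid logos)"
  else
    let generated := logos.countP (fun sku => pvHasSuccess items sku)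
    PySem.Int.toStr ((generated : Nat) : Int) ++ " out of " ++ PySem.Int.toStr ((logos.length : Nat) : Int)

-- ===== PRECONDITION & SPEC =====
def Spec_calculate_pdf_generation_status (items : List (List (String × String))) (out : String) : Prop := out = calculate_pdf_generation_status_alt items
instance (items : List (List (String × String))) (out : String) : Decidable (Spec_calculate_pdf_generation_status items out) := by unfold Spec_calculate_pdf_generation_status; infer_instance

-- ===== CLAIM =====
def Claim_equal_calculate_pdf_generation_status : Prop := ∀ (items : List (List (String × String))), Dom_calculate_pdf_generation_status items → Spec_calculate_pdf_generation_status items (calculate_pdf_generation_status items)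

-- ===== LEMMAS AND PROOFS =====

-- A's validity test equals "not in pvInvalid" (the "" disjunct is subsumed by the list).
theorem pv_valid_iff (L : String) :
    (L ≠ "" ∧ L ∉ (["", "0", "0000", "nan", "NaN"] : List String)) ↔ L ∉ pvInvalid := by
  unfold pvInvalid
  constructor
  · exact fun h => h.2
  · intro h
    exact ⟨fun h0 => h (by simp [h0]), h⟩

-- Two nodup lists, one included in the other: counting members of the smaller inside the
-- bigger gives the smaller's length.
theorem pv_countP_mem (u g : List String) (hu : u.Nodup) (hg : g.Nodup)
    (hsub : ∀ x ∈ g, x ∈ u) :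
    u.countP (fun k => decide (k ∈ g)) = g.length := by
  rw [List.countP_eq_length_filter]
  have hfn : (u.filter (fun k => decide (k ∈ g))).Nodup := hu.filter _
  have hmem : ∀ x, x ∈ u.filter (fun k => decide (k ∈ g)) ↔ x ∈ g := by
    intro x
    simp only [List.mem_filter, decide_eq_true_eq]
    exact ⟨fun h => h.2, fun h => ⟨hsub x h, h⟩⟩
  exact ((List.perm_ext_iff_of_nodup hfn hg).2 hmem).length_eq

-- Every member of B's stage-1 fold is an old member of the accumulator or a valid sku.
theorem pv_buildLogos_valid (items : List (List (String × String))) (acc : List String)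
    (k : String) (hk : k ∈ items.foldl (fun acc item =>
      let sku := pvLogoOf item
      if sku ∉ pvInvalid ∧ sku ∉ acc then acc ++ [sku] else acc) acc) :
    k ∈ acc ∨ k ∉ pvInvalid := by
  induction items generalizing acc with
  | nil => exact Or.inl hk
  | cons item rest ih =>
    simp only [List.foldl_cons] at hk
    rcases ih _ hk with h | h
    · by_cases hc : pvLogoOf item ∉ pvInvalid ∧ pvLogoOf item ∉ acc
      · simp only [if_pos hc, List.mem_append, List.mem_singleton] at h
        rcases h with h | h
        · exact Or.inl h
        · subst h; exact Or.inr hc.1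
      · rw [if_neg hc] at h; exact Or.inl h
    · exact Or.inr h

-- The main invariant: A's fold from (u, g) has first component equal to B's stage-1 fold
-- from u, and membership in the second component is "old member of g, or a valid sku with
-- some SUCCESS item among the remaining ones"; nodup and inclusion are carried along.
theorem pv_loop_inv (items : List (List (String × String)))
    (u g : List String) (h3 : u.Nodup) (h4 : g.Nodup) (h5 : ∀ x ∈ g, x ∈ u) :
    (items.foldl pvStepA (u, g)).1 = items.foldl (fun acc item =>
        let sku := pvLogoOf item
        if sku ∉ pvInvalid ∧ sku ∉ acc then acc ++ [sku] else acc) u ∧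
    (∀ k, k ∈ (items.foldl pvStepA (u, g)).2 ↔
        k ∈ g ∨ (k ∉ pvInvalid ∧ pvHasSuccess items k = true)) ∧
    (items.foldl pvStepA (u, g)).1.Nodup ∧ (items.foldl pvStepA (u, g)).2.Nodup ∧
    (∀ x ∈ (items.foldl pvStepA (u, g)).2, x ∈ (items.foldl pvStepA (u, g)).1) := by
  induction items generalizing u g with
  | nil =>
    refine ⟨rfl, fun k => ?_, h3, h4, h5⟩
    simp [pvHasSuccess]
  | cons item rest ih =>
    simp only [List.foldl_cons]
    set L := pvLogoOf item with hL
    have hLs : PySem.Str.strip ((PySem.Dict.mk item).getD "LOGO" "") = L := rfl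
    set s := ((PySem.Dict.mk item).getD "Execution Status" "" == "SUCCESS") with hs
    have hsucc : ∀ k, pvHasSuccess (item :: rest) k = ((L == k) && s || pvHasSuccess rest k) := by
      intro k; simp [pvHasSuccess, ← hL, ← hs, List.any_cons]
    by_cases hv : L ∉ pvInvalid
    · have hvA : L ≠ "" ∧ L ∉ (["", "0", "0000", "nan", "NaN"] : List String) :=
        (pv_valid_iff L).2 hv
      have hstepA : pvStepA (u, g) item =
          (PySem.Set.add u L, if s then PySem.Set.add g L else g) := by
        simp only [pvStepA, hLs, ← hs, if_pos hvA]
        cases s <;> simp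
      have hstepB : (if L ∉ pvInvalid ∧ L ∉ u then u ++ [L] else u) = PySem.Set.add u L := by
        by_cases hLu : L ∈ u
        · rw [if_neg (by simp [hLu]), PySem.Set.add_of_mem hLu]
        · rw [if_pos ⟨hv, hLu⟩, PySem.Set.add_of_not_mem hLu]
      have hg' : (if s then PySem.Set.add g L else g).Nodup := by
        split_ifs with _
        · exact PySem.Set.nodup_add _ _ h4
        · exact h4
      have hsub' : ∀ x ∈ (if s then PySem.Set.add g L else g), x ∈ PySem.Set.add u L := by
        intro x hx
        split_ifs at hx with _
        · rcases (PySem.Set.mem_add _ _ _).1 hx with h | h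
          · exact (PySem.Set.mem_add _ _ _).2 (Or.inl (h5 x h))
          · exact (PySem.Set.mem_add _ _ _).2 (Or.inr h)
        · exact (PySem.Set.mem_add _ _ _).2 (Or.inl (h5 x hx))
      obtain ⟨ih1, ih2, ih3, ih4, ih5⟩ :=
        ih (PySem.Set.add u L) (if s then PySem.Set.add g L else g)
          (PySem.Set.nodup_add _ _ h3) hg' hsub'
      rw [hstepA]
      refine ⟨by rw [ih1, hstepB], fun k => ?_, ih3, ih4, ih5⟩
      rw [ih2 k, hsucc k]
      constructor
      · rintro (hk | hk)
        · split_ifs at hk with hsb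
          · rcases (PySem.Set.mem_add _ _ _).1 hk with h | h
            · exact Or.inl h
            · subst h; exact Or.inr ⟨hv, by simp [hsb]⟩
          · exact Or.inl hk
        · exact Or.inr ⟨hk.1, by simp [hk.2]⟩
      · rintro (hk | ⟨hkv, hk⟩)
        · refine Or.inl ?_
          split_ifs with _
          · exact (PySem.Set.mem_add _ _ _).2 (Or.inl hk)
          · exact hk
        · rcases Bool.or_eq_true_iff.1 hk with h | h
          · rcases Bool.and_eq_true_iff.1 h with ⟨h1, h2⟩
            refine Or.inl ?_
            rw [if_pos h2]
            exact (PySem.Set.mem_add _ _ _).2 (Or.inr (eq_of_beq h1).symm)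
          · exact Or.inr ⟨hkv, h⟩
    · have hvA : ¬ (L ≠ "" ∧ L ∉ (["", "0", "0000", "nan", "NaN"] : List String)) :=
        fun h => hv ((pv_valid_iff L).1 h)
      have hstepA : pvStepA (u, g) item = (u, g) := by
        simp only [pvStepA, hLs, if_neg hvA]
      have hstepB : (if L ∉ pvInvalid ∧ L ∉ u then u ++ [L] else u) = u := by
        rw [if_neg (fun h => hv h.1)]
      obtain ⟨ih1, ih2, ih3, ih4, ih5⟩ := ih u g h3 h4 h5
      rw [hstepA]
      refine ⟨by rw [ih1, hstepB], fun k => ?_, ih3, ih4, ih5⟩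
      rw [ih2 k, hsucc k]
      constructor
      · rintro (hk | hk)
        · exact Or.inl hk
        · exact Or.inr ⟨hk.1, by simp [hk.2]⟩
      · rintro (hk | ⟨hkv, hk⟩)
        · exact Or.inl hk
        · rcases Bool.or_eq_true_iff.1 hk with h | h
          · rcases Bool.and_eq_true_iff.1 h with ⟨h1, _⟩
            have hLinv : L ∈ pvInvalid := not_not.1 hv
            exact absurd ((eq_of_beq h1) ▸ hLinv) hkv
          · exact Or.inr ⟨hkv, h⟩

-- ===== VERDICT =====
theorem calculate_pdf_generation_status_spec : Claim_equal_calculate_pdf_generation_status := by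
  unfold Claim_equal_calculate_pdf_generation_status
  intro items _
  unfold Spec_calculate_pdf_generation_status
  unfold calculate_pdf_generation_status calculate_pdf_generation_status_alt
  obtain ⟨h1, h2, hnu, hng, hsub⟩ :=
    pv_loop_inv items PySem.Set.empty PySem.Set.empty List.nodup_nil List.nodup_nil
      (fun x hx => absurd hx (List.not_mem_nil))
  set pa := items.foldl pvStepA (PySem.Set.empty, PySem.Set.empty) with hpa
  have hlogos : pvBuildLogos items = pa.1 := h1.symm
  have hcount : pa.1.countP (fun sku => pvHasSuccess items sku) = pa.2.length := by
    have hcongr : ∀ k ∈ pa.1,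
        (pvHasSuccess items k = true ↔ decide (k ∈ pa.2) = true) := by
      intro k hk
      have hkv : k ∉ pvInvalid := by
        rcases pv_buildLogos_valid items PySem.Set.empty k (h1 ▸ hk) with h | h
        · exact absurd h (List.not_mem_nil)
        · exact h
      rw [decide_eq_true_iff]
      constructor
      · intro hb
        exact (h2 k).2 (Or.inr ⟨hkv, hb⟩)
      · intro hmem
        rcases (h2 k).1 hmem with h | ⟨_, h⟩
        · exact absurd h (List.not_mem_nil)
        · exact h
    rw [List.countP_congr hcongr]
    exact pv_countP_mem pa.1 pa.2 hnu hng hsub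
  rw [hlogos]
  simp only [PySem.Set.len, hcount]
  by_cases h0 : pa.1 = []
  · simp [h0]
  · have h1' : pa.1.isEmpty = false := by simp [h0]
    have h2' : ¬ ((pa.1.length : Int) = 0) := by
      simp [List.length_eq_zero_iff, h0]
    rw [if_neg h2', h1', if_neg Bool.false_ne_true]
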